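-- pv_equiv track=rewrite | github.com/Nohyunjin/codingtest | Inflearn/2_자릿수의 합.py | digit_sum
-- ===== SOURCE A (Python) =====
-- def digit_sum(x):
--     res = 0
--     while x > 0 :
--         if x % 10 > 0:
--             res += x % 10
--             x = x // 10
--         elif x % 10 == 0 :
--             break
--     return res
-- ===== SOURCE B (Python) =====
-- def digit_sum(x):
--     if x <= 0:
--         return 0
--     total = 0
--     for ch in reversed(str(x)):
--         if ch == '0':
--             break
--         total += int(ch)
--     return total
-- ===== Notes on version B (the rewrite author's own statement) =====
-- stated objective: idiomatic
-- what changed: Replaces the %10//10 arithmetic while-loop with a traversal of the reversed decimal string of x, summing int(ch) and breaking at the first '0' character.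
import Mathlib
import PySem

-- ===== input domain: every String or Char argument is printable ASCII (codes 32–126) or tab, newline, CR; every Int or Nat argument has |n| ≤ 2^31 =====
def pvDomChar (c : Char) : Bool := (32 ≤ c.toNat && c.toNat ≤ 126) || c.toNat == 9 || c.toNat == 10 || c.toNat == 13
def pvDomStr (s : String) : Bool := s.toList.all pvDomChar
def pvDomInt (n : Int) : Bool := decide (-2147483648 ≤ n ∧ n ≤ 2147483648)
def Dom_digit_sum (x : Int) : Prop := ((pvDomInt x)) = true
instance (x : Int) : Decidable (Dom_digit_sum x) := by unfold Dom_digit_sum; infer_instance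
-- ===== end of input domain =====

-- B re-implements A's digit-by-digit modulo loop as a traversal of str(x) reversed (idiomatic; same behaviour, |return value only).


-- ===== PORT A =====
-- A's while loop; for 0 < x, x % 10 lies in [0,10), so the 'elif x % 10 == 0: break' is exactly the else-branch.
def digit_sum_loop (x res : Int) : Int :=
  if _h : 0 < x then
    if PySem.Int.mod x 10 > 0 then
      digit_sum_loop (PySem.Int.floordiv x 10) (res + PySem.Int.mod x 10)
    else res
  else res
termination_by x.toNat
decreasing_by
  rw [PySem.Int.floordiv_eq_ediv_of_pos (by omega)]
  omega

def digit_sum (x : Int) : Int := digit_sum_loop x 0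

-- ===== PORT B =====
-- the for-loop of B over the reversed character list; int(ch) is PySem.Int.ofStr? on the one-char
-- string (getD 0 only makes the port total; every character seen is a decimal digit, so it never fires)
def digit_sum_sumRev (cs : List Char) (total : Int) : Int :=
  match cs with
  | [] => total
  | c :: t =>
    if c = '0' then total
    else digit_sum_sumRev t (total + ((PySem.Int.ofStr? (String.ofList [c])).getD 0))

def digit_sum_alt (x : Int) : Int :=
  if x ≤ 0 then 0
  else digit_sum_sumRev ((PySem.Int.toStr x).toList.reverse) 0

-- ===== PRECONDITION & SPEC =====
def Spec_digit_sum (x : Int) (out : Int) : Prop := out = digit_sum_alt x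
instance (x : Int) (out : Int) : Decidable (Spec_digit_sum x out) := by unfold Spec_digit_sum; infer_instance

-- ===== CLAIM (what is proved, stated in full; the proofs are below) =====
def Claim_equal_digit_sum : Prop := ∀ (x : Int), Dom_digit_sum x → Spec_digit_sum x (digit_sum x)

-- ===== LEMMAS AND PROOFS =====

lemma digitChar_eq_zero_iff (d : Nat) (hd : d < 10) : Nat.digitChar d = '0' ↔ d = 0 := by
  interval_cases d <;> decide

lemma val_digitChar (d : Nat) (hd : d < 10) :
    ((PySem.Int.ofStr? (String.ofList [Nat.digitChar d])).getD 0) = (d : Int) := by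
  interval_cases d <;> rfl

lemma mod_cast10 (n : Nat) : PySem.Int.mod (n : Int) 10 = ((n % 10 : Nat) : Int) := by
  exact_mod_cast PySem.Int.mod_natCast n 10

lemma floordiv_cast10 (n : Nat) : PySem.Int.floordiv (n : Int) 10 = ((n / 10 : Nat) : Int) := by
  exact_mod_cast PySem.Int.floordiv_natCast n 10

lemma digit_sum_loop_zero (res : Int) : digit_sum_loop 0 res = res := by
  unfold digit_sum_loop; simp

lemma digit_sum_main (n : Nat) (hn : 0 < n) (acc : Int) :
    digit_sum_sumRev ((Nat.toDigits 10 n).reverse) acc = digit_sum_loop (n : Int) acc := by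
  induction n using Nat.strong_induction_on generalizing acc with
  | _ n ih =>
    rw [Nat.toDigits_eq_if (by norm_num)]
    rw [digit_sum_loop]
    have hpos : (0 : Int) < (n : Int) := by exact_mod_cast hn
    simp only [hpos, dif_pos, mod_cast10, floordiv_cast10]
    by_cases h10 : n < 10
    · have hmod : n % 10 = n := Nat.mod_eq_of_lt h10
      have hdiv : n / 10 = 0 := Nat.div_eq_of_lt h10
      simp only [if_pos h10, List.reverse_singleton]
      rw [digit_sum_sumRev]
      rw [if_neg (by simpa [hn.ne'] using (digitChar_eq_zero_iff n h10).not)]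
      rw [digit_sum_sumRev, val_digitChar n h10]
      rw [if_pos (by exact_mod_cast hmod ▸ hn), hmod, hdiv]
      simp [digit_sum_loop_zero]
    · simp only [if_neg h10, List.reverse_append, List.reverse_singleton, List.singleton_append]
      rw [digit_sum_sumRev]
      have hm10 : n % 10 < 10 := Nat.mod_lt _ (by norm_num)
      by_cases hz : n % 10 = 0
      · rw [if_pos ((digitChar_eq_zero_iff _ hm10).mpr hz)]
        rw [if_neg (by simp [hz])]
      · rw [if_neg (by simpa [hz] using (digitChar_eq_zero_iff _ hm10).not)]
        rw [if_pos (by exact_mod_cast Nat.pos_of_ne_zero hz)]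
        rw [val_digitChar _ hm10]
        have hd_pos : 0 < n / 10 := Nat.div_pos (Nat.le_of_not_lt h10) (by norm_num)
        have hd_lt : n / 10 < n := Nat.div_lt_self hn (by norm_num)
        exact ih (n / 10) hd_lt hd_pos _

-- ===== VERDICT (by name: the statement is the Claim_ definition above) =====
theorem digit_sum_spec : Claim_equal_digit_sum := by
  intro x _
  unfold Spec_digit_sum digit_sum digit_sum_alt
  by_cases hx : x ≤ 0
  · rw [if_pos hx, digit_sum_loop]
    simp [not_lt.mpr hx]
  · rw [if_neg hx]
    rw [not_le] at hx
    rw [PySem.Int.toList_toStr]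
    unfold PySem.Int.toChars
    rw [if_neg (by omega)]
    have hx' : x = (x.toNat : Int) := by omega
    rw [hx', (digit_sum_main x.toNat (by omega) 0).symm, Int.toNat_natCast]
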